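-- pv_equiv track=rewrite | github.com/paulooliva/paulooliva.github.io | competition/2021/Solutions/Birds.py | birdCount
-- ===== SOURCE A (Python) =====
-- def birdCount(birds):
--     # The function is expected to return an INTEGER.
--     # The function accepts STRING birds as parameter.
--     count = 0
--     for i in range(0, len(birds)):
--         if birds[i] == '<':
--             for j in range(0, i):
--                 if birds[j] == '>':
--                     count += 1
--         else:
--             for j in range(i+1, len(birds)):
--                 if birds[j] == '<':
--                     count += 1
--     return count
-- ===== SOURCE B (Python) =====
-- def birdCount(birds):
--     # One pass: running count of '>' seen so far (gt) and of '<' still ahead (lt_rem).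
--     lt_rem = sum(1 for c in birds if c == '<')
--     gt = 0
--     count = 0
--     for c in birds:
--         if c == '<':
--             lt_rem -= 1
--             count += gt
--         else:
--             count += lt_rem
--             if c == '>':
--                 gt += 1
--     return count
-- ===== Notes on version B (the rewrite author's own statement) =====
-- stated objective: faster
-- what changed: Replaced A's nested index scans (for each position, rescan the prefix for '>' or the suffix for '<') by a single left-to-right pass that maintains a running count of '>' seen so far and a count of '<' remaining ahead.
import Mathlib
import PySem

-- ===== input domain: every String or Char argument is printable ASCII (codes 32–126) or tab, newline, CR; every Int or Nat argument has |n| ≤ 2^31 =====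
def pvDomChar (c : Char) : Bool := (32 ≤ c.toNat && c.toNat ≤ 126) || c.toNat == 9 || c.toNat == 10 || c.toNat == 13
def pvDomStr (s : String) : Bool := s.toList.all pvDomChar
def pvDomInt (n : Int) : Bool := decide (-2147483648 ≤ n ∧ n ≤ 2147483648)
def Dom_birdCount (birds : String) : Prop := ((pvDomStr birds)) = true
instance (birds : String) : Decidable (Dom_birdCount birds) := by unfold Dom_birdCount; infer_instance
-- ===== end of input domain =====

-- B replaces A's quadratic index-pair scan by one linear pass holding a running
-- prefix count of '>' and a remaining-suffix count of '<' (objective: faster).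

-- ===== PORT A =====
-- literal port of A: outer loop over range(0, len(birds)); the '<' branch scans
-- range(0, i) for '>', the else branch scans range(i+1, len(birds)) for '<'.
def birdCount (birds : String) : Int :=
  let l := birds.toList
  let n : Int := l.length
  (PySem.List.pyRange 0 n 1).foldl (fun count i =>
    if PySem.List.pyGetD l i ' ' == '<' then
      (PySem.List.pyRange 0 i 1).foldl (fun c j =>
        if PySem.List.pyGetD l j ' ' == '>' then c + 1 else c) count
    else
      (PySem.List.pyRange (i + 1) n 1).foldl (fun c j =>
        if PySem.List.pyGetD l j ' ' == '<' then c + 1 else c) count) 0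

-- ===== PORT B =====
-- the body of Source B's single for-loop over the characters, state (gt, lt_rem, count)
def birdStep (st : Int × Int × Int) (c : Char) : Int × Int × Int :=
  if c == '<' then (st.1, st.2.1 - 1, st.2.2 + st.1)
  else (if c == '>' then st.1 + 1 else st.1, st.2.1, st.2.2 + st.2.1)

-- literal port of Source B: lt_rem = sum(1 for c in birds if c == '<'), then one pass
def birdCount_alt (birds : String) : Int :=
  let ltRem : Int := birds.toList.foldl (fun acc c => if c == '<' then acc + 1 else acc) 0
  (birds.toList.foldl birdStep (0, ltRem, 0)).2.2

-- ===== PRECONDITION & SPEC =====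
def Spec_birdCount (birds : String) (out : Int) : Prop := out = birdCount_alt birds
instance (birds : String) (out : Int) : Decidable (Spec_birdCount birds out) := by unfold Spec_birdCount; infer_instance

-- ===== CLAIM (what is proved, stated in full; the proofs are below) =====
def Claim_equal_birdCount : Prop := ∀ (birds : String), Dom_birdCount birds → Spec_birdCount birds (birdCount birds)

-- ===== LEMMAS AND PROOFS =====

-- contribution of index k in A's outer loop
def gN (L : List Char) (k : Nat) : Int :=
  if L.getD k ' ' == '<' then ((L.take k).count '>' : Int)
  else ((L.drop (k + 1)).count '<' : Int)

-- recursive characterisation of A's total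
def Asum : List Char → Int
  | [] => 0
  | x :: xs =>
      (if x == '<' then 0 else ((xs.count '<' : Int))) +
      (if x == '>' then ((xs.count '<' : Int)) else 0) + Asum xs

-- recursive characterisation of B's pass from an arbitrary state (gt, ltRem)
def W : List Char → Int → Int → Int
  | [], _, _ => 0
  | x :: xs, g, r =>
      if x == '<' then g + W xs g (r - 1)
      else r + W xs (if x == '>' then g + 1 else g) r

lemma gN_zero (x : Char) (xs : List Char) :
    gN (x :: xs) 0 = if x == '<' then 0 else ((xs.count '<' : Int)) := by
  simp [gN]

lemma gN_succ (x : Char) (xs : List Char) (k : Nat) :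
    gN (x :: xs) (k + 1) =
      gN xs k + (if xs.getD k ' ' == '<' then (if x == '>' then (1 : Int) else 0) else 0) := by
  simp only [gN, List.getD_cons_succ, List.take_succ_cons, List.drop_succ_cons]
  split_ifs with h <;> simp_all

lemma sum_indicator (xs : List Char) (e : Int) :
    ((List.range xs.length).map (fun k => if xs.getD k ' ' == '<' then e else 0)).sum
      = e * (xs.count '<' : Int) := by
  induction xs with
  | nil => simp
  | cons x t ih =>
      rw [List.length_cons, List.range_succ_eq_map]
      simp only [List.map_cons, List.map_map, List.sum_cons, Function.comp_def,
        List.getD_cons_succ, List.getD_cons_zero, List.count_cons, ih]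
      by_cases h : x == '<' <;> simp [h, mul_add] <;> ring

lemma sumA_eq (L : List Char) :
    ((List.range L.length).map (gN L)).sum = Asum L := by
  induction L with
  | nil => simp [Asum]
  | cons x xs ih =>
      rw [List.length_cons, List.range_succ_eq_map]
      simp only [List.map_cons, List.map_map, List.sum_cons, Function.comp_def]
      have hmap : (List.range xs.length).map (fun k => gN (x :: xs) (k + 1))
          = (List.range xs.length).map
              (fun k => gN xs k + (if xs.getD k ' ' == '<' then (if x == '>' then (1 : Int) else 0) else 0)) :=
        List.map_congr_left (fun k _ => gN_succ x xs k)
      rw [hmap, PySem.List.sum_map_add_int, ih, sum_indicator, gN_zero, Asum]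
      by_cases hx : x == '>' <;> by_cases hl : x == '<' <;> simp_all <;> ring

-- A's inner '<'-branch loop counts '>' among the first m characters
lemma inner_gt (L : List Char) (m : Nat) (hm : m ≤ L.length) (c : Int) :
    (PySem.List.pyRange 0 (m : Int) 1).foldl (fun c j =>
        if PySem.List.pyGetD L j ' ' == '>' then c + 1 else c) c
      = c + ((L.take m).count '>' : Int) := by
  induction m generalizing c with
  | zero => simp [PySem.List.pyRange_one_eq_nil]
  | succ m ih =>
      have h1 : ((m + 1 : Nat) : Int) = (m : Int) + 1 := by push_cast; ring
      rw [h1, PySem.List.pyRange_one_succ_right (by positivity), List.foldl_append,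
        ih (Nat.le_of_succ_le hm)]
      have hlt : m < L.length := hm
      have hget : PySem.List.pyGetD L (m : Int) ' ' = L[m] := by
        rw [PySem.List.pyGetD_natCast, List.getD_eq_getElem L ' ' hlt]
      have htake : ((L.take (m + 1)).count '>' : Int)
          = ((L.take m).count '>' : Int) + (if L[m] == '>' then 1 else 0) := by
        rw [List.take_add_one, List.getElem?_eq_getElem hlt]
        simp only [List.count_append, Option.toList_some, List.count_singleton]
        by_cases h : L[m] == '>' <;> simp [h]
      simp only [List.foldl_cons, List.foldl_nil, hget, htake]
      by_cases h : L[m] == '>' <;> simp [h] <;> ring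

-- A's value is the sum over indices of gN
lemma birdCount_eq_sum (birds : String) :
    birdCount birds = ((List.range birds.toList.length).map (gN birds.toList)).sum := by
  unfold birdCount
  set L := birds.toList with hL
  have hcongr : ∀ (count : Int), ∀ i ∈ PySem.List.pyRange 0 (L.length : Int) 1,
      (if PySem.List.pyGetD L i ' ' == '<' then
        (PySem.List.pyRange 0 i 1).foldl (fun c j =>
          if PySem.List.pyGetD L j ' ' == '>' then c + 1 else c) count
      else
        (PySem.List.pyRange (i + 1) (L.length : Int) 1).foldl (fun c j =>
          if PySem.List.pyGetD L j ' ' == '<' then c + 1 else c) count)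
      = count + gN L i.toNat := by
    intro count i hi
    rw [PySem.List.mem_pyRange_one] at hi
    obtain ⟨h0, hn⟩ := hi
    have hi' : i = ((i.toNat : Nat) : Int) := (Int.toNat_of_nonneg h0).symm
    have hlen : i.toNat < L.length := by omega
    have hget : PySem.List.pyGetD L i ' ' = L.getD i.toNat ' ' := by
      conv_lhs => rw [hi']
      rw [PySem.List.pyGetD_natCast]
    by_cases hc : L.getD i.toNat ' ' == '<'
    · rw [if_pos (by rw [hget]; exact hc)]
      conv_lhs => rw [hi']
      rw [inner_gt L i.toNat (le_of_lt hlen)]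
      unfold gN
      rw [if_pos hc]
    · rw [if_neg (by rw [hget]; exact hc)]
      rw [PySem.List.foldl_pyRange_pyGetD' L ' '
        (fun acc ch => if ch == '<' then acc + 1 else acc) count (by omega),
        PySem.List.foldl_beq_add_one]
      have h2 : (i + 1).toNat = i.toNat + 1 := by omega
      unfold gN
      rw [if_neg hc, h2]
  rw [PySem.List.foldl_congr_mem _ _ (fun count i => count + gN L i.toNat) _
    (fun acc x hx => hcongr acc x hx)]
  rw [PySem.List.foldl_add]
  rw [show ((L.length : Int)) = ((L.length : Nat) : Int) from rfl,
    PySem.List.pyRange_zero_natCast, List.map_map]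
  simp [Function.comp_def]

-- B's pass from any state: third component is old count plus W
lemma alt_eq_W (L : List Char) (g r c : Int) :
    (L.foldl birdStep (g, r, c)).2.2 = c + W L g r := by
  induction L generalizing g r c with
  | nil => simp [W]
  | cons x xs ih =>
      simp only [List.foldl_cons]
      by_cases h : x == '<'
      · rw [show birdStep (g, r, c) x = (g, r - 1, c + g) by simp [birdStep, h], ih]
        simp only [W, h, if_pos]
        ring
      · rw [show birdStep (g, r, c) x = ((if x == '>' then g + 1 else g), r, c + r) by
          simp [birdStep, h], ih]
        simp only [W]
        simp [h]
        ring

-- W started at the true remaining-'<' count equals Asum plus the cross term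
lemma W_eq_Asum (L : List Char) (g : Int) :
    W L g ((L.count '<' : Int)) = Asum L + g * ((L.count '<' : Int)) := by
  induction L generalizing g with
  | nil => simp [W, Asum]
  | cons x xs ih =>
      have hcount : ((x :: xs).count '<' : Int)
          = (xs.count '<' : Int) + (if x == '<' then 1 else 0) := by
        rw [List.count_cons]
        by_cases h : x == '<' <;> simp [h]
      by_cases h : x == '<'
      · have hx : (x == '>') = false := by
          simp only [beq_iff_eq] at h ⊢; simp [h]
        simp only [W, Asum, h, hx, if_pos, hcount]
        rw [show (xs.count '<' : Int) + 1 - 1 = (xs.count '<' : Int) by ring, ih]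
        simp
        ring
      · simp only [W, Asum, hcount]
        simp only [h, if_neg, Bool.false_eq_true, not_false_iff]
        by_cases hx : x == '>' <;> simp [hx, ih] <;> ring

-- ===== VERDICT (by name: the statement is the Claim_ definition above) =====
theorem birdCount_spec : Claim_equal_birdCount := by
  intro birds _
  unfold Spec_birdCount
  rw [birdCount_eq_sum, sumA_eq]
  show _ = birdCount_alt birds
  unfold birdCount_alt
  rw [alt_eq_W, PySem.List.foldl_if_add_one]
  have : ((birds.toList.countP (fun c => c == '<') : Int)) = ((birds.toList.count '<' : Int)) := by
    simp [List.count]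
  rw [this]; simp only [zero_add]; rw [W_eq_Asum]
  ring
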